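-- pv_equiv track=rewrite | github.com/GrayOM/Availability-Low-Reconnaissance | collectors/ct_collector.py | _deduplicate_subdomains
-- ===== SOURCE A (Python) =====
-- def _deduplicate_subdomains(names: list) -> list:
--     seen = set()
--     result = []
--     for n in names:
--         n = n.lower().strip()
--         if n and n not in seen:
--             seen.add(n)
--             result.append(n)
--     return sorted(result)
-- ===== SOURCE B (Python) =====
-- def _deduplicate_subdomains(names: list) -> list:
--     cleaned = sorted(m for m in (n.lower().strip() for n in names) if m)
--     result = []
--     prev = None
--     for m in cleaned:
--         if m != prev:
--             result.append(m)
--             prev = m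
--     return result
-- ===== Notes on version B (the rewrite author's own statement) =====
-- stated objective: alternative
-- what changed: Replaces the hash-set dedupe-then-sort pass by sort-first then a single prev-tracking scan that keeps an element only when it differs from its predecessor (no membership set at all).
import Mathlib
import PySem

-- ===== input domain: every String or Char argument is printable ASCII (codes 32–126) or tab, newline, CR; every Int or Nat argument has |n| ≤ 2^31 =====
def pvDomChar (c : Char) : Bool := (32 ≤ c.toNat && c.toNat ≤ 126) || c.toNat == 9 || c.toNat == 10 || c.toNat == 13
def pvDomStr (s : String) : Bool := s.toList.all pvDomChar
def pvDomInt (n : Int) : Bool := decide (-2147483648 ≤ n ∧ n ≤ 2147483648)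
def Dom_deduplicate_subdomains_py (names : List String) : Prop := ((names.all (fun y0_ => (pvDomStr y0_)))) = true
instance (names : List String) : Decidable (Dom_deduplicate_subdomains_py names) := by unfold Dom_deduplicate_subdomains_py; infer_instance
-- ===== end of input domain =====

-- B replaces A's hash-set dedupe-then-sort by sort-first plus one prev-tracking scan dropping adjacent duplicates (alternative decomposition, same cost).

-- n.lower().strip() — shared normalization expression of both Pythons
def pvNorm (n : String) : String := PySem.Str.strip (PySem.Str.lower n)

-- ===== PORT A =====
def deduplicate_subdomains_py (names : List String) : List String :=
  -- seen = set(); result = []; for n in names: …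
  let st := names.foldl
    (fun (acc : PySem.Set String × List String) n =>
      let m := pvNorm n
      if m ≠ "" ∧ ¬ PySem.Set.contains acc.1 m then
        (PySem.Set.add acc.1 m, acc.2 ++ [m])
      else acc)
    (PySem.Set.empty, [])
  PySem.List.sorted st.2 (fun x => x) false

-- ===== PORT B =====
def deduplicate_subdomains_py_alt (names : List String) : List String :=
  let cleaned := PySem.List.sorted ((names.map pvNorm).filter (fun m => m ≠ "")) (fun x => x) false
  -- result = []; prev = None; for m in cleaned: if m != prev: append, prev = m
  (cleaned.foldl
    (fun (st : List String × Option String) m =>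
      if some m ≠ st.2 then (st.1 ++ [m], some m) else st)
    ([], none)).1

-- ===== PRECONDITION & SPEC =====
def Spec_deduplicate_subdomains_py (names : List String) (out : List String) : Prop := out = deduplicate_subdomains_py_alt names
instance (names : List String) (out : List String) : Decidable (Spec_deduplicate_subdomains_py names out) := by unfold Spec_deduplicate_subdomains_py; infer_instance

-- ===== CLAIM (what is proved, stated in full; the proofs are below) =====
def Claim_equal_deduplicate_subdomains_py : Prop := ∀ (names : List String), Dom_deduplicate_subdomains_py names → Spec_deduplicate_subdomains_py names (deduplicate_subdomains_py names)

-- ===== LEMMAS AND PROOFS =====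

-- A's loop keeps seen (as a list) and result identical, and builds set(filtered normalized names)
theorem pvFoldA (names : List String) (s : PySem.Set String) :
    names.foldl
      (fun (acc : PySem.Set String × List String) n =>
        let m := pvNorm n
        if m ≠ "" ∧ ¬ PySem.Set.contains acc.1 m then
          (PySem.Set.add acc.1 m, acc.2 ++ [m])
        else acc)
      (s, s)
    = (((names.map pvNorm).filter (fun m => m ≠ "")).foldl PySem.Set.add s,
       ((names.map pvNorm).filter (fun m => m ≠ "")).foldl PySem.Set.add s) := by
  induction names generalizing s with
  | nil => simp
  | cons n t ih =>
    have h1 : (fun (acc : PySem.Set String × List String) n =>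
        let m := pvNorm n
        if m ≠ "" ∧ ¬ PySem.Set.contains acc.1 m then
          (PySem.Set.add acc.1 m, acc.2 ++ [m])
        else acc) (s, s) n
        = ((if pvNorm n ≠ "" then PySem.Set.add s (pvNorm n) else s),
           (if pvNorm n ≠ "" then PySem.Set.add s (pvNorm n) else s)) := by
      by_cases he : pvNorm n = ""
      · simp [he]
      · by_cases hc : pvNorm n ∈ s
        · simp [he, hc]
        · simp [he, hc]
    rw [List.foldl_cons]
    refine Eq.trans (congrArg (fun st => List.foldl (fun (acc : PySem.Set String × List String) n =>
        let m := pvNorm n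
        if m ≠ "" ∧ ¬ PySem.Set.contains acc.1 m then
          (PySem.Set.add acc.1 m, acc.2 ++ [m])
        else acc) st t) h1) ?_
    refine Eq.trans (ih _) ?_
    by_cases he : pvNorm n = ""
    · simp [he]
    · simp [he]

-- the collapse-adjacent-duplicates pass, recursively
def pvCollapse : List String → Option String → List String
  | [], _ => []
  | y :: t, prev => if some y ≠ prev then y :: pvCollapse t (some y) else pvCollapse t prev

theorem pvFoldB (ys : List String) (acc : List String) (prev : Option String) :
    (ys.foldl
      (fun (st : List String × Option String) m =>
        if some m ≠ st.2 then (st.1 ++ [m], some m) else st)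
      (acc, prev)).1 = acc ++ pvCollapse ys prev := by
  induction ys generalizing acc prev with
  | nil => simp [pvCollapse]
  | cons y t ih =>
    by_cases h : some y = prev
    · have hstep := ih acc prev
      simp only [ne_eq, ite_not] at hstep
      simp [pvCollapse, h, hstep]
    · have hstep := ih (acc ++ [y]) (some y)
      simp only [ne_eq, ite_not] at hstep
      simp [pvCollapse, h, hstep]

theorem pvCollapse_spec (ys : List String) (prev : Option String)
    (hp : ys.Pairwise (· ≤ ·)) (hprev : ∀ p, prev = some p → ∀ y ∈ ys, p ≤ y) :
    (pvCollapse ys prev).Pairwise (· < ·) ∧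
      ∀ a, a ∈ pvCollapse ys prev ↔ (a ∈ ys ∧ prev ≠ some a) := by
  induction ys generalizing prev with
  | nil => simp [pvCollapse]
  | cons y t ih =>
    rcases List.pairwise_cons.mp hp with ⟨hy, ht⟩
    by_cases h : some y = prev
    · have hprev' : ∀ p, prev = some p → ∀ z ∈ t, p ≤ z := by
        intro p hpeq z hz
        exact hprev p hpeq z (List.mem_cons_of_mem _ hz)
      obtain ⟨ihp, ihm⟩ := ih prev ht hprev'
      have hcol : pvCollapse (y :: t) prev = pvCollapse t prev := by
        simp [pvCollapse, h]
      refine ⟨hcol ▸ ihp, ?_⟩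
      intro a
      rw [hcol, ihm a]
      constructor
      · rintro ⟨ha, hne⟩; exact ⟨List.mem_cons_of_mem _ ha, hne⟩
      · rintro ⟨ha, hne⟩
        rcases List.mem_cons.mp ha with rfl | ha
        · exact absurd h.symm hne
        · exact ⟨ha, hne⟩
    · have hprev' : ∀ p, (some y : Option String) = some p → ∀ z ∈ t, p ≤ z := by
        intro p hpeq z hz
        cases Option.some.inj hpeq
        exact hy z hz
      obtain ⟨ihp, ihm⟩ := ih (some y) ht hprev'
      have hcol : pvCollapse (y :: t) prev = y :: pvCollapse t (some y) := by
        simp [pvCollapse, h]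
      constructor
      · rw [hcol]
        refine List.pairwise_cons.mpr ⟨?_, ihp⟩
        intro b hb
        obtain ⟨hbt, hbne⟩ := (ihm b).mp hb
        have hyb : y ≤ b := hy b hbt
        have : y ≠ b := by intro he; exact hbne (by rw [he])
        exact lt_of_le_of_ne hyb this
      · intro a
        rw [hcol]
        simp only [List.mem_cons, ihm a]
        constructor
        · rintro (rfl | ⟨hat, hane⟩)
          · exact ⟨Or.inl rfl, fun he => h he.symm⟩
          · refine ⟨Or.inr hat, ?_⟩
            intro he
            have hay : a ≤ y := hprev a he y (List.mem_cons_self)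
            have hya : y ≤ a := hy a hat
            exact hane (congrArg some (le_antisymm hya hay))
        · rintro ⟨rfl | hat, hane⟩
          · exact Or.inl rfl
          · by_cases hay : a = y
            · exact Or.inl hay
            · exact Or.inr ⟨hat, fun he => hay (Option.some.inj he).symm⟩

-- ===== VERDICT (by name: the statement is the Claim_ definition above) =====
theorem deduplicate_subdomains_py_spec : Claim_equal_deduplicate_subdomains_py := by
  intro names _
  unfold Spec_deduplicate_subdomains_py deduplicate_subdomains_py deduplicate_subdomains_py_alt
  set xs := (names.map pvNorm).filter (fun m => m ≠ "") with hxs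
  have hA : names.foldl
      (fun (acc : PySem.Set String × List String) n =>
        let m := pvNorm n
        if m ≠ "" ∧ ¬ PySem.Set.contains acc.1 m then
          (PySem.Set.add acc.1 m, acc.2 ++ [m])
        else acc)
      (PySem.Set.empty, []) = (xs.foldl PySem.Set.add [], xs.foldl PySem.Set.add []) :=
    pvFoldA names PySem.Set.empty
  simp only [hA]
  have hset : xs.foldl PySem.Set.add [] = PySem.Set.ofList xs :=
    (PySem.Set.ofList_eq_foldl xs).symm
  rw [hset, pvFoldB]
  set ys := PySem.List.sorted xs (fun x => x) false with hys
  have hyp : ys.Pairwise (· ≤ ·) := PySem.List.sorted_pairwise xs (fun x => x)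
  obtain ⟨hlt, hmem⟩ := pvCollapse_spec ys none hyp (by intro p hp; cases hp)
  have hnodup : (pvCollapse ys none).Nodup :=
    hlt.imp (fun h => ne_of_lt h)
  have hmem' : ∀ a, a ∈ pvCollapse ys none ↔ a ∈ PySem.Set.ofList xs := by
    intro a
    rw [hmem a, PySem.Set.mem_ofList]
    simp [hys, PySem.List.mem_sorted]
  have hperm : (pvCollapse ys none).Perm (PySem.Set.ofList xs) := by
    rw [List.perm_ext_iff_of_nodup hnodup (PySem.Set.nodup_ofList xs)]
    exact hmem'
  have := PySem.List.sorted_eq_of_perm_of_pairwise_lt (xs := PySem.Set.ofList xs)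
      (ys := pvCollapse ys none) (key := fun x => x) hperm hlt
  simpa using this
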